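-- pv_equiv track=rewrite | github.com/Matteo842/SaveState | update_manager.py | _compare_at
-- ===== SOURCE A (Python) =====
-- def _all_default(parts: list, start: int) -> bool:
--     """Return True if every component from index `start` is (0, '')."""
--     return all(n == 0 and l == "" for n, l in parts[start:])
--
-- def _compare_at(pa: list, pb: list, i: int) -> int:
--     if i >= len(pa) and i >= len(pb):
--         return 0
--     if i >= len(pa):
--         return 0 if _all_default(pb, i) else -1
--     if i >= len(pb):
--         return 0 if _all_default(pa, i) else 1
--
--     na, la = pa[i]
--     nb, lb = pb[i]
--     if na != nb:
--         return -1 if na < nb else 1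
--     if la == lb:
--         return _compare_at(pa, pb, i + 1)
--
--     # Numbers equal at this position, letters differ.
--     if la == "":
--         # pa has no letter here. Does it have a meaningful deeper component?
--         if i + 1 < len(pa) and not _all_default(pa, i + 1):
--             return 1   # deeper component beats a letter hotfix
--         return -1      # base release < hotfix release at same level
--     if lb == "":
--         if i + 1 < len(pb) and not _all_default(pb, i + 1):
--             return -1
--         return 1
--     # Both have letters but they differ — compare alphabetically.
--     return -1 if la < lb else 1
-- ===== SOURCE B (Python) =====
-- def _rest_default(parts: list, start: int) -> bool:
--     """True if every component from index `start` on is the default (0, '')."""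
--     return all(p == (0, "") for p in parts[start:])
--
-- def _compare_at(pa: list, pb: list, i: int) -> int:
--     # Skip the common prefix of identical components, then decide in one place.
--     m = min(len(pa), len(pb))
--     j = i
--     while j < m and pa[j] == pb[j]:
--         j += 1
--     if j < m:
--         na, la = pa[j]
--         nb, lb = pb[j]
--         if na != nb:
--             return -1 if na < nb else 1
--         # numbers equal here, so the letters must differ
--         if la == "":
--             return 1 if j + 1 < len(pa) and not _rest_default(pa, j + 1) else -1
--         if lb == "":
--             return -1 if j + 1 < len(pb) and not _rest_default(pb, j + 1) else 1
--         return -1 if la < lb else 1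
--     if j >= len(pa) and j >= len(pb):
--         return 0
--     if j >= len(pa):
--         return 0 if _rest_default(pb, j) else -1
--     return 0 if _rest_default(pa, j) else 1
-- ===== Notes on version B (the rewrite author's own statement) =====
-- stated objective: alternative
-- what changed: B replaces A's tail recursion with a skip-common-prefix scan (a loop that advances past pairwise-equal components) followed by a single non-recursive decision block for the first differing position / exhaustion.
import Mathlib
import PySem

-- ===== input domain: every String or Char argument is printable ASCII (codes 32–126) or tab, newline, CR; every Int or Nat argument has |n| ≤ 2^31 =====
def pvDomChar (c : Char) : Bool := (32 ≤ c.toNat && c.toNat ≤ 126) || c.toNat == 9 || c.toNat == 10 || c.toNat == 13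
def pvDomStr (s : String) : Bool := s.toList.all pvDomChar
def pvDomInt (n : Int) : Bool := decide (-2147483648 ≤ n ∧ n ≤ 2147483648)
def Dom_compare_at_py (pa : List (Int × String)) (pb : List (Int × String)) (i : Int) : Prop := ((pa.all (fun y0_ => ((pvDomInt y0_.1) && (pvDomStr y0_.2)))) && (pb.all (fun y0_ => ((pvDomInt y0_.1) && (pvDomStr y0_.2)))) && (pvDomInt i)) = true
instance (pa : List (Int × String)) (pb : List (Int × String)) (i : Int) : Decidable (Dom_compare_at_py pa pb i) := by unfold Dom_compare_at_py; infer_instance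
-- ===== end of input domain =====

-- B replaces A's tail recursion by a skip-common-prefix scan plus one decision block; equivalence on inputs where A does not raise.

-- ===== PORT A =====
-- _all_default(parts, start)
def allDefault (parts : List (Int × String)) (start : Int) : Bool :=
  (PySem.List.slice parts (some start) none).all (fun nl => nl.1 == 0 && nl.2 == "")

-- A's recursion, with a Nat fuel making it structural; the fuel compare_at_py passes
-- strictly exceeds the possible number of recursive steps, so the 0-fuel branch is never
-- reached on inputs where the Python returns (recursion requires both indexings to succeed).
def compareAtGo (pa : List (Int × String)) (pb : List (Int × String)) (fuel : Nat) (i : Int) : Int :=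
  match fuel with
  | 0 => 0  -- unreachable under Pre_
  | fuel + 1 =>
    if i ≥ (pa.length : Int) ∧ i ≥ (pb.length : Int) then 0
    else if i ≥ (pa.length : Int) then (if allDefault pb i then 0 else -1)
    else if i ≥ (pb.length : Int) then (if allDefault pa i then 0 else 1)
    else
      match PySem.List.pyGet? pa i, PySem.List.pyGet? pb i with
      | some (na, la), some (nb, lb) =>
        if na ≠ nb then (if na < nb then -1 else 1)
        else if la = lb then compareAtGo pa pb fuel (i + 1)
        else if la = "" then
          (if i + 1 < (pa.length : Int) ∧ allDefault pa (i + 1) = false then 1 else -1)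
        else if lb = "" then
          (if i + 1 < (pb.length : Int) ∧ allDefault pb (i + 1) = false then -1 else 1)
        else if la < lb then -1 else 1
      | _, _ => 0  -- IndexError in Python; excluded by Pre_

def compare_at_py (pa : List (Int × String)) (pb : List (Int × String)) (i : Int) : Int :=
  compareAtGo pa pb (2 * pa.length + 1) i

-- ===== PORT B =====
-- _rest_default(parts, start)
def restDefault (parts : List (Int × String)) (start : Int) : Bool :=
  (PySem.List.slice parts (some start) none).all (fun p => p == ((0 : Int), ""))

-- the `while j < m and pa[j] == pb[j]: j += 1` loop (final value of j), with a Nat fuel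
-- making it structural; the fuel compare_at_py_alt passes strictly exceeds the possible
-- number of iterations, so the 0-fuel branch is never reached where the Python returns.
def skipEqGo (pa : List (Int × String)) (pb : List (Int × String)) (fuel : Nat) (j : Int) : Int :=
  match fuel with
  | 0 => j  -- unreachable under Pre_
  | fuel + 1 =>
    if j < ((min pa.length pb.length : Nat) : Int) then
      match PySem.List.pyGet? pa j, PySem.List.pyGet? pb j with
      | some x, some y => if x = y then skipEqGo pa pb fuel (j + 1) else j
      | _, _ => j  -- IndexError in Python; excluded by Pre_
    else j

def compare_at_py_alt (pa : List (Int × String)) (pb : List (Int × String)) (i : Int) : Int :=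
  let m : Int := ((min pa.length pb.length : Nat) : Int)
  let j := skipEqGo pa pb (2 * min pa.length pb.length + 1) i
  if j < m then
    match PySem.List.pyGet? pa j, PySem.List.pyGet? pb j with
    | some (na, la), some (nb, lb) =>
      if na ≠ nb then (if na < nb then -1 else 1)
      else if la = "" then
        (if j + 1 < (pa.length : Int) ∧ restDefault pa (j + 1) = false then 1 else -1)
      else if lb = "" then
        (if j + 1 < (pb.length : Int) ∧ restDefault pb (j + 1) = false then -1 else 1)
      else if la < lb then -1 else 1
    | _, _ => 0  -- IndexError in Python; excluded by Pre_
  else if j ≥ (pa.length : Int) ∧ j ≥ (pb.length : Int) then 0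
  else if j ≥ (pa.length : Int) then (if restDefault pb j then 0 else -1)
  else (if restDefault pa j then 0 else 1)

-- ===== PRECONDITION & SPEC =====
-- Pre_ excludes exactly the inputs where Python raises IndexError (a too-negative index
-- i < -len reaching pa[i]/pb[i]); both A and B raise there.
def Pre_compare_at_py (pa : List (Int × String)) (pb : List (Int × String)) (i : Int) : Prop :=
  0 ≤ i ∨ (-(pa.length : Int) ≤ i ∧ -(pb.length : Int) ≤ i)
instance (pa : List (Int × String)) (pb : List (Int × String)) (i : Int) : Decidable (Pre_compare_at_py pa pb i) := by unfold Pre_compare_at_py; infer_instance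
def pvWitness_compare_at_py : (List (Int × String)) × (List (Int × String)) × Int := ([(1, "a")], [(1, "b")], 0)

def Spec_compare_at_py (pa : List (Int × String)) (pb : List (Int × String)) (i : Int) (out : Int) : Prop := out = compare_at_py_alt pa pb i
instance (pa : List (Int × String)) (pb : List (Int × String)) (i : Int) (out : Int) : Decidable (Spec_compare_at_py pa pb i out) := by unfold Spec_compare_at_py; infer_instance

-- ===== CLAIM (what is proved, stated in full; the proofs are below) =====
def Claim_equal_compare_at_py : Prop := ∀ (pa : List (Int × String)) (pb : List (Int × String)) (i : Int), Dom_compare_at_py pa pb i → Pre_compare_at_py pa pb i → Spec_compare_at_py pa pb i (compare_at_py pa pb i)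

-- ===== LEMMAS AND PROOFS =====

-- B's decision block, factored out for the proofs (decideB ∘ skipEqGo is definitionally compare_at_py_alt)
def decideB (pa : List (Int × String)) (pb : List (Int × String)) (j : Int) : Int :=
  if j < ((min pa.length pb.length : Nat) : Int) then
    match PySem.List.pyGet? pa j, PySem.List.pyGet? pb j with
    | some (na, la), some (nb, lb) =>
      if na ≠ nb then (if na < nb then -1 else 1)
      else if la = "" then
        (if j + 1 < (pa.length : Int) ∧ restDefault pa (j + 1) = false then 1 else -1)
      else if lb = "" then
        (if j + 1 < (pb.length : Int) ∧ restDefault pb (j + 1) = false then -1 else 1)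
      else if la < lb then -1 else 1
    | _, _ => 0
  else if j ≥ (pa.length : Int) ∧ j ≥ (pb.length : Int) then 0
  else if j ≥ (pa.length : Int) then (if restDefault pb j then 0 else -1)
  else (if restDefault pa j then 0 else 1)

theorem alt_eq_decideB (pa pb : List (Int × String)) (i : Int) :
    compare_at_py_alt pa pb i = decideB pa pb (skipEqGo pa pb (2 * min pa.length pb.length + 1) i) := rfl

theorem restDefault_eq_allDefault (parts : List (Int × String)) (start : Int) :
    restDefault parts start = allDefault parts start := rfl

theorem skipEqGo_stop (pa pb : List (Int × String)) (g : Nat) (j : Int)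
    (h : ¬ j < ((min pa.length pb.length : Nat) : Int)) : skipEqGo pa pb g j = j := by
  cases g with
  | zero => rfl
  | succ g => unfold skipEqGo; rw [if_neg h]

theorem skipEqGo_ne (pa pb : List (Int × String)) (g : Nat) (j : Int) (x y : Int × String)
    (h : j < ((min pa.length pb.length : Nat) : Int))
    (hx : PySem.List.pyGet? pa j = some x) (hy : PySem.List.pyGet? pb j = some y)
    (hxy : x ≠ y) : skipEqGo pa pb (g + 1) j = j := by
  unfold skipEqGo
  rw [if_pos h]
  simp only [hx, hy]
  rw [if_neg hxy]

theorem skipEqGo_step (pa pb : List (Int × String)) (g : Nat) (j : Int) (x : Int × String)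
    (h : j < ((min pa.length pb.length : Nat) : Int))
    (hx : PySem.List.pyGet? pa j = some x) (hy : PySem.List.pyGet? pb j = some x) :
    skipEqGo pa pb (g + 1) j = skipEqGo pa pb g (j + 1) := by
  unfold skipEqGo
  rw [if_pos h]
  simp only [hx, hy, if_true]
  cases g <;> rfl

theorem pyGet?_isSome_of_pre {pa : List (Int × String)} {i : Int}
    (hlo : -(pa.length : Int) ≤ i) (hhi : i < (pa.length : Int)) :
    ∃ x, PySem.List.pyGet? pa i = some x := by
  cases hx : PySem.List.pyGet? pa i with
  | some x => exact ⟨x, rfl⟩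
  | none =>
    rw [PySem.List.pyGet?_eq_none_iff] at hx
    exact absurd ⟨by omega, by omega⟩ hx

-- when the recursion/loop is over, A's exhaustion branches equal B's decision block
theorem go_stop (pa pb : List (Int × String)) (k : Nat) (i : Int)
    (hm : ¬ i < ((min pa.length pb.length : Nat) : Int)) :
    compareAtGo pa pb (k + 1) i = decideB pa pb i := by
  unfold compareAtGo decideB
  rw [if_neg hm]
  push_cast at hm
  by_cases h2 : i ≥ (pa.length : Int)
  · by_cases h1 : i ≥ (pb.length : Int)
    · simp [h1, h2]
    · simp [h1, h2, restDefault_eq_allDefault]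
  · have h3 : i ≥ (pb.length : Int) := by omega
    simp [h2, h3, restDefault_eq_allDefault]

theorem key (pa pb : List (Int × String)) (k : Nat) : ∀ (g : Nat) (i : Int),
    Pre_compare_at_py pa pb i →
    ((min pa.length pb.length : Nat) : Int) - i ≤ k →
    ((min pa.length pb.length : Nat) : Int) - i < g →
    compareAtGo pa pb (k + 1) i = decideB pa pb (skipEqGo pa pb g i) := by
  induction k with
  | zero =>
    intro g i _ hk _
    have hm : ¬ i < ((min pa.length pb.length : Nat) : Int) := by omega
    rw [skipEqGo_stop pa pb g i hm, go_stop pa pb 0 i hm]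
  | succ k ih =>
    intro g i hpre hk hg
    by_cases hm : i < ((min pa.length pb.length : Nat) : Int)
    · have hpa : -(pa.length : Int) ≤ i := by
        rcases hpre with h | ⟨h1, _⟩ <;> omega
      have hpb : -(pb.length : Int) ≤ i := by
        rcases hpre with h | ⟨_, h2⟩ <;> omega
      obtain ⟨⟨na, la⟩, hx⟩ := pyGet?_isSome_of_pre (pa := pa) hpa (by push_cast at hm ⊢; omega)
      obtain ⟨⟨nb, lb⟩, hy⟩ := pyGet?_isSome_of_pre (pa := pb) hpb (by push_cast at hm ⊢; omega)
      have h1 : ¬ (i ≥ (pa.length : Int) ∧ i ≥ (pb.length : Int)) := by push_cast at hm; omega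
      have h2 : ¬ i ≥ (pa.length : Int) := by push_cast at hm; omega
      have h3 : ¬ i ≥ (pb.length : Int) := by push_cast at hm; omega
      obtain ⟨g, rfl⟩ : ∃ g', g = g' + 1 := ⟨g - 1, by omega⟩
      by_cases heq : ((na, la) : Int × String) = (nb, lb)
      · -- equal pair: A recurses, B's loop steps; both sides advance to i + 1
        obtain ⟨hna, hla⟩ := Prod.mk.injEq .. ▸ heq
        have hrec : compareAtGo pa pb (k + 1 + 1) i = compareAtGo pa pb (k + 1) (i + 1) := by
          conv_lhs => rw [compareAtGo]
          rw [if_neg h1, if_neg h2, if_neg h3]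
          simp only [hx, hy]
          rw [if_neg (fun hcon : na ≠ nb => hcon hna), if_pos hla]
        rw [hrec, skipEqGo_step pa pb g i (na, la) hm hx (heq ▸ hy)]
        exact ih g (i + 1)
          (by
            unfold Pre_compare_at_py at hpre ⊢
            rcases hpre with h | ⟨ha, hb⟩
            · exact Or.inl (by omega)
            · exact Or.inr ⟨by omega, by omega⟩)
          (by omega) (by omega)
      · -- first differing pair: the loop stops here; both decide with the same branches
        rw [skipEqGo_ne pa pb g i _ _ hm hx hy heq]
        unfold compareAtGo decideB
        rw [if_neg h1, if_neg h2, if_neg h3, if_pos hm]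
        simp only [hx, hy]
        by_cases hn : na = nb
        · have hl : la ≠ lb := by
            intro hle; exact heq (by rw [hn, hle])
          simp only [hn, hl, restDefault_eq_allDefault, ne_eq, not_true_eq_false, if_false]
          rfl
        · simp [hn]
    · rw [skipEqGo_stop pa pb _ i hm, go_stop pa pb (k + 1) i hm]

theorem main_eq (pa pb : List (Int × String)) (i : Int)
    (hpre : Pre_compare_at_py pa pb i) :
    compare_at_py pa pb i = compare_at_py_alt pa pb i := by
  rw [alt_eq_decideB]
  unfold compare_at_py
  have hge : -((min pa.length pb.length : Nat) : Int) ≤ i := by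
    rcases hpre with h | ⟨h1, h2⟩ <;> (push_cast; omega)
  have hla : ((min pa.length pb.length : Nat) : Int) ≤ (pa.length : Int) := by push_cast; omega
  exact key pa pb (2 * pa.length) (2 * min pa.length pb.length + 1) i hpre
    (by push_cast at hla ⊢; omega) (by push_cast; omega)

-- ===== VERDICT (by name: the statement is the Claim_ definition above) =====
theorem compare_at_py_spec : Claim_equal_compare_at_py := by
  intro pa pb i _hdom hpre
  unfold Spec_compare_at_py
  exact main_eq pa pb i hpre
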